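-- pv_equiv track=rewrite | github.com/arnwaldn/atum-system | scripts/validate-markdown.py | check_code_blocks
-- ===== SOURCE A (Python) =====
-- def check_code_blocks(content, filepath):
--     """Check for unclosed code blocks."""
--     issues = []
--     lines = content.split("\n")
--     in_code = False
--     code_start = 0
--
--     for i, line in enumerate(lines, 1):
--         stripped = line.strip()
--         if stripped.startswith("```"):
--             if in_code:
--                 in_code = False
--             else:
--                 in_code = True
--                 code_start = i
--
--     if in_code:
--         issues.append(f"{filepath}:{code_start}: Unclosed code block")
--
--     return issues
-- ===== SOURCE B (Python) =====
-- def _next_fence(lines, i):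
--     """Index of the first fence line at or after i, or None."""
--     while i < len(lines):
--         if lines[i].strip().startswith("```"):
--             return i
--         i += 1
--     return None
--
--
-- def check_code_blocks(content, filepath):
--     """Check for unclosed code blocks."""
--     lines = content.split("\n")
--     i = 0
--     while True:
--         opener = _next_fence(lines, i)
--         if opener is None:
--             return []
--         closer = _next_fence(lines, opener + 1)
--         if closer is None:
--             return [f"{filepath}:{opener + 1}: Unclosed code block"]
--         i = closer + 1
-- ===== Notes on version B (the rewrite author's own statement) =====
-- stated objective: alternative
-- what changed: Replaces A's whole-file toggle state machine (in_code flag plus code_start, decided after the loop) with a greedy opener/closer pair-matching scanner: repeatedly find the next fence and its closing fence, skip the matched block, and early-return the opener left without a closer.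
import Mathlib
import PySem

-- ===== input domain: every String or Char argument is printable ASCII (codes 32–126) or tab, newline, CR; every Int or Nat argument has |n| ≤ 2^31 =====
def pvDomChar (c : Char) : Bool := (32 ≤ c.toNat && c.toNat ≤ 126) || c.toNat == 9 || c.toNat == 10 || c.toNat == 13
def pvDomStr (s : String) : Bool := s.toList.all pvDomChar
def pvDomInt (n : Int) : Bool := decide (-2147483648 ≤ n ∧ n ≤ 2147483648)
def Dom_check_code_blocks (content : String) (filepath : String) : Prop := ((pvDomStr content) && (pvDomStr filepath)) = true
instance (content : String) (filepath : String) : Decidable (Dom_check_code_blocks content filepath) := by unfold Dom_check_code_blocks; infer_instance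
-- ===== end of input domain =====

-- B replaces A's whole-file toggle state machine (in_code flag + code_start) with a greedy
-- opener/closer pair-matching scanner that skips each matched block and early-returns the
-- opener left without a closer (objective: alternative decomposition, same cost).


-- ===== PORT A =====
-- line.strip().startswith("```")  (the fence test both Pythons write verbatim)
def isFence (line : String) : Bool := PySem.Str.startswith (PySem.Str.strip line) "```"

-- the body of A's for-loop over enumerate(lines, 1): state (in_code, code_start)
def fenceStep (st : Bool × Int) (p : Int × String) : Bool × Int :=
  if isFence p.2 then (if st.1 then (false, st.2) else (true, p.1)) else st

def check_code_blocks (content : String) (filepath : String) : List String :=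
  let lines := (PySem.Str.split? content "\n").getD []  -- sep "\n" is nonempty, so split? is some
  let r := (PySem.List.enumerate lines 1).foldl fenceStep (false, 0)
  if r.1 then [filepath ++ ":" ++ PySem.Int.toStr r.2 ++ ": Unclosed code block"] else []

-- ===== PORT B =====
-- _next_fence(lines, i): index of the first fence line at or after i, or None
-- (the while loop is ported with structural fuel; fuel = lines.length always suffices)
def skipToFence (lines : List String) : Nat → Nat → Option Nat
  | 0, _ => none
  | fuel + 1, i =>
    if h : i < lines.length then
      if isFence lines[i] then some i else skipToFence lines fuel (i + 1)
    else none

-- the while-True loop of B: find an opener, find its closer, skip the block or report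
-- (fuel again; one unit per matched block, so lines.length + 1 at the call site suffices)
def pairScan (lines : List String) (filepath : String) : Nat → Nat → List String
  | 0, _ => []
  | fuel + 1, i =>
    match skipToFence lines lines.length i with
    | none => []
    | some opener =>
      match skipToFence lines lines.length (opener + 1) with
      | none => [filepath ++ ":" ++ PySem.Int.toStr ((opener : Int) + 1) ++ ": Unclosed code block"]
      | some closer => pairScan lines filepath fuel (closer + 1)

def check_code_blocks_alt (content : String) (filepath : String) : List String :=
  let lines := (PySem.Str.split? content "\n").getD []  -- sep "\n" nonempty, split? is some
  pairScan lines filepath (lines.length + 1) 0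

-- ===== PRECONDITION & SPEC =====
def Spec_check_code_blocks (content : String) (filepath : String) (out : List String) : Prop := out = check_code_blocks_alt content filepath
instance (content : String) (filepath : String) (out : List String) : Decidable (Spec_check_code_blocks content filepath out) := by unfold Spec_check_code_blocks; infer_instance

-- ===== CLAIM (what is proved, stated in full; the proofs are below) =====
def Claim_equal_check_code_blocks : Prop := ∀ (content : String) (filepath : String), Dom_check_code_blocks content filepath → Spec_check_code_blocks content filepath (check_code_blocks content filepath)

-- ===== LEMMAS AND PROOFS =====

-- the 1-based line numbers of the fence lines of an enumerated line list
def fencesOf (l : List (Int × String)) : List Int :=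
  l.filterMap (fun p => if isFence p.2 then some p.1 else none)

-- what greedy pair-matching does to a list of fence line numbers
def pairResult (fp : String) : List Int → List String
  | [] => []
  | [a] => [fp ++ ":" ++ PySem.Int.toStr a ++ ": Unclosed code block"]
  | _ :: _ :: t => pairResult fp t

lemma getLast?_getD_cons (i : Int) (ft : List Int) (s : Int) :
    (i :: ft).getLast?.getD s = ft.getLast?.getD i := by
  cases ft with
  | nil => rfl
  | cons a l => rw [List.getLast?_cons_cons]; cases h : (a :: l).getLast? <;> simp_all

lemma fencesOf_cons_fence (p : Int × String) (t : List (Int × String)) (hf : isFence p.2 = true) :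
    fencesOf (p :: t) = p.1 :: fencesOf t := by simp [fencesOf, hf]

-- greedy pairing leaves the last fence unmatched exactly when the count is odd
lemma pairResult_closed (fp : String) (F : List Int) :
    pairResult fp F = if F.length % 2 = 1
      then [fp ++ ":" ++ PySem.Int.toStr (F.getLast?.getD 0) ++ ": Unclosed code block"]
      else [] := by
  fun_induction pairResult fp F with
  | case1 => simp
  | case2 a => simp
  | case3 a b t ih =>
    rw [ih]
    rcases Nat.mod_two_eq_zero_or_one t.length with hp | hp
    · simp [List.length_cons, Nat.add_mod, hp]
    · have hne : t ≠ [] := by intro he; rw [he] at hp; simp at hp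
      have h2 : (a :: b :: t).getLast? = t.getLast? := by
        cases t with
        | nil => exact absurd rfl hne
        | cons c t' => rw [List.getLast?_cons_cons, List.getLast?_cons_cons]
      simp [List.length_cons, Nat.add_mod, hp, h2]

-- A's loop invariant: the fold's in_code flag is the fence-count parity, and whenever it
-- ends true, code_start is the last fence (or the start value when no fence was seen)
lemma fold_fence (l : List (Int × String)) (b : Bool) (s : Int) :
    (l.foldl fenceStep (b, s)).1 = (b != decide ((fencesOf l).length % 2 = 1)) ∧
    ((l.foldl fenceStep (b, s)).1 = true →
      (l.foldl fenceStep (b, s)).2 = (fencesOf l).getLast?.getD s) := by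
  induction l generalizing b s with
  | nil => simp [fencesOf]
  | cons p t ih =>
    by_cases hf : isFence p.2
    · rw [fencesOf_cons_fence p t hf]
      cases b with
      | false =>
        have hstep : fenceStep (false, s) p = (true, p.1) := by simp [fenceStep, hf]
        simp only [List.foldl_cons, hstep]
        obtain ⟨h1, h2⟩ := ih true p.1
        refine ⟨?_, ?_⟩
        · rw [h1]
          rcases Nat.mod_two_eq_zero_or_one (fencesOf t).length with hp | hp <;>
            simp [List.length_cons, Nat.add_mod, hp]
        · intro h; rw [h2 h, getLast?_getD_cons]
      | true =>
        have hstep : fenceStep (true, s) p = (false, s) := by simp [fenceStep, hf]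
        simp only [List.foldl_cons, hstep]
        obtain ⟨h1, h2⟩ := ih false s
        refine ⟨?_, ?_⟩
        · rw [h1]
          rcases Nat.mod_two_eq_zero_or_one (fencesOf t).length with hp | hp <;>
            simp [List.length_cons, Nat.add_mod, hp]
        · intro h
          have hodd : (fencesOf t).length % 2 = 1 := by
            rw [h1] at h; simpa using h
          have hne : fencesOf t ≠ [] := by
            intro he; rw [he] at hodd; simp at hodd
          rw [h2 h, getLast?_getD_cons]
          cases hg : (fencesOf t).getLast? with
          | none => exact absurd (List.getLast?_eq_none_iff.mp hg) hne
          | some a => simp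
    · have hstep : fenceStep (b, s) p = (b, s) := by simp [fenceStep, hf]
      have hfc : fencesOf (p :: t) = fencesOf t := by simp [fencesOf, hf]
      simp only [List.foldl_cons, hstep, hfc]
      exact ih b s

-- fence line numbers of the suffix of lines from index i, numbered from i+1
def fencesFrom (lines : List String) (i : Nat) : List Int :=
  fencesOf (PySem.List.enumerate (lines.drop i) ((i : Int) + 1))

-- one step of fencesFrom at an in-range index
lemma fencesFrom_step (lines : List String) (i : Nat) (hlt : i < lines.length) :
    fencesFrom lines i
      = (if isFence lines[i] then [((i : Int) + 1)] else []) ++ fencesFrom lines (i + 1) := by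
  have hc : ((i : Int) + 1) + 1 = (((i + 1 : Nat) : Int) + 1) := by push_cast; ring
  rw [fencesFrom, List.drop_eq_getElem_cons hlt, PySem.List.enumerate_cons, hc, fencesFrom]
  by_cases hf : isFence lines[i] <;> simp [fencesOf, hf]

-- skipToFence characterised against fencesFrom: none means no fences left
lemma skip_none (lines : List String) (fuel : Nat) : ∀ i : Nat, lines.length ≤ fuel + i →
    skipToFence lines fuel i = none → fencesFrom lines i = [] := by
  induction fuel with
  | zero =>
    intro i hle _
    have hd : lines.drop i = [] := List.drop_eq_nil_of_le (by omega)
    simp [fencesFrom, hd, fencesOf]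
  | succ fuel ih =>
    intro i hle h
    rw [skipToFence] at h
    by_cases hlt : i < lines.length
    · rw [dif_pos hlt] at h
      by_cases hf : isFence lines[i]
      · rw [if_pos hf] at h; cases h
      · rw [if_neg hf] at h
        rw [fencesFrom_step lines i hlt]
        simp only [hf, if_neg Bool.false_ne_true, List.nil_append]
        exact ih (i + 1) (by omega) h
    · have hd : lines.drop i = [] := List.drop_eq_nil_of_le (by omega)
      simp [fencesFrom, hd, fencesOf]

-- skipToFence characterised against fencesFrom: some j means j+1 heads the fence numbers
lemma skip_some (lines : List String) (fuel : Nat) : ∀ i j : Nat,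
    skipToFence lines fuel i = some j →
    fencesFrom lines i = ((j : Int) + 1) :: fencesFrom lines (j + 1) := by
  induction fuel with
  | zero => intro i j h; cases h
  | succ fuel ih =>
    intro i j h
    rw [skipToFence] at h
    by_cases hlt : i < lines.length
    · rw [dif_pos hlt] at h
      by_cases hf : isFence lines[i]
      · rw [if_pos hf, Option.some.injEq] at h
        subst h
        rw [fencesFrom_step lines i hlt]
        simp [hf]
      · rw [if_neg hf] at h
        rw [fencesFrom_step lines i hlt]
        simp only [hf, if_neg Bool.false_ne_true, List.nil_append]
        exact ih (i + 1) j h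
    · rw [dif_neg hlt] at h; cases h

-- B's loop computes exactly the greedy pairing of the remaining fences
lemma pairScan_eq (lines : List String) (fp : String) (fuel : Nat) : ∀ i : Nat,
    (fencesFrom lines i).length ≤ fuel →
    pairScan lines fp fuel i = pairResult fp (fencesFrom lines i) := by
  induction fuel with
  | zero =>
    intro i hle
    have h0 : fencesFrom lines i = [] := List.length_eq_zero_iff.mp (by omega)
    rw [h0, pairScan]
    rfl
  | succ fuel ih =>
    intro i hle
    rw [pairScan]
    cases hs : skipToFence lines lines.length i with
    | none => rw [skip_none lines lines.length i (by omega) hs]; rfl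
    | some opener =>
      rw [skip_some lines lines.length i opener hs]
      dsimp only
      cases hc : skipToFence lines lines.length (opener + 1) with
      | none =>
        rw [skip_none lines lines.length (opener + 1) (by omega) hc]
        rfl
      | some closer =>
        rw [skip_some lines lines.length (opener + 1) closer hc]
        dsimp only
        have hlen : (fencesFrom lines (closer + 1)).length ≤ fuel := by
          rw [skip_some lines lines.length i opener hs,
            skip_some lines lines.length (opener + 1) closer hc] at hle
          simp at hle; omega
        rw [show pairResult fp (((opener : Int) + 1) :: ((closer : Int) + 1)
              :: fencesFrom lines (closer + 1))
            = pairResult fp (fencesFrom lines (closer + 1)) from rfl,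
          ih (closer + 1) hlen]

-- the fence list is no longer than the line list (gives the top-level fuel bound)
lemma fencesFrom_len (lines : List String) :
    (fencesFrom lines 0).length ≤ lines.length := by
  calc (fencesFrom lines 0).length
      ≤ (PySem.List.enumerate (lines.drop 0) ((0 : Int) + 1)).length :=
        List.length_filterMap_le _ _
    _ = lines.length := by simp [PySem.List.length_enumerate]

-- ===== VERDICT (by name: the statement is the Claim_ definition above) =====
theorem check_code_blocks_spec : Claim_equal_check_code_blocks := by
  intro content filepath _
  unfold Spec_check_code_blocks check_code_blocks check_code_blocks_alt
  dsimp only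
  set ls := (PySem.Str.split? content "\n").getD [] with hls
  rw [pairScan_eq ls filepath (ls.length + 1) 0 (by have := fencesFrom_len ls; omega)]
  have hf0 : fencesFrom ls 0 = fencesOf (PySem.List.enumerate ls 1) := by
    simp [fencesFrom]
  rw [hf0, pairResult_closed]
  obtain ⟨h1, h2⟩ := fold_fence (PySem.List.enumerate ls 1) false 0
  set r := (PySem.List.enumerate ls 1).foldl fenceStep (false, 0) with hr
  by_cases hodd : (fencesOf (PySem.List.enumerate ls 1)).length % 2 = 1
  · have hb : r.1 = true := by rw [h1]; simp [hodd]
    rw [hb, h2 hb, if_pos rfl, if_pos hodd]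
  · have hb : r.1 = false := by rw [h1]; simp [hodd]
    rw [hb, if_neg (by simp), if_neg hodd]
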